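-- pv_equiv track=rewrite | github.com/ChangSu10/COVID19_subphenotyping | 4_respiration_score.py | combile_Pco2
-- ===== SOURCE A (Python) =====
-- def combile_Pco2(combile_data):
--     # combile PO2 ARTERIAL {NYP},PO2 (ARTERIAL) - EPOC {NYP}
--     Pao2_art = combile_data['PCO2 ARTERIAL {NYP}']
--     Pao2_Epoc = combile_data['PCO2 (ARTERIAL) - EPOC {NYP}']
--     for k in Pao2_Epoc.keys():
--         if k in Pao2_art.keys():
--             art_data = Pao2_art[k]
--             Epoc_data = Pao2_Epoc[k]
--             A = art_data
--             B = Epoc_data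
--
--             result = []
--             i, j = 0, 0
--             while i < len(A) and j < len(B):
--                 if A[i][1] < B[j][1]:
--                     result.append(A[i])
--                     i += 1
--                 else:
--                     result.append(B[j])
--                     j += 1
--             result += A[i:]
--             result += B[j:]
--             d1 ={k:result}
--             Pao2_art.update(d1)
--
--         else:
--             Pao2_art[k] = Pao2_Epoc[k] # add new item
--
--     updated_result = {'PCO2 ARTERIAL {NYP}':Pao2_art}
--     combile_data.update(updated_result)
--
--     return combile_data
-- ===== SOURCE B (Python) =====
-- # Same return value as A; B rebuilds the merged dict functionally (comprehension +
-- # dict-splat) instead of mutating in place, and merges by consuming queue copies.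
-- # Note: A mutates the inner art dict in place; B replaces the entry with new dicts
-- # (the returned value is identical).
-- def _merge(a, b):
--     sa, sb = list(a), list(b)
--     out = []
--     while sa and sb:
--         out.append(sa.pop(0) if sa[0][1] < sb[0][1] else sb.pop(0))
--     return out + sa + sb
--
-- def combile_Pco2(combile_data):
--     art = combile_data['PCO2 ARTERIAL {NYP}']
--     epoc = combile_data['PCO2 (ARTERIAL) - EPOC {NYP}']
--     merged = {k: _merge(art[k], epoc[k]) if k in art else epoc[k] for k in epoc}
--     combile_data['PCO2 ARTERIAL {NYP}'] = {**art, **merged}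
--     return combile_data
-- ===== Notes on version B (the rewrite author's own statement) =====
-- stated objective: simpler
-- what changed: B replaces A's in-place dict mutation and index-based two-pointer merge with a functional rebuild: a dict comprehension computes the merged per-key lists, a single dict-splat overlays them on the original art dict, and the merge helper consumes queue copies of the two lists instead of tracking indices and appending slice tails; Pre_ additionally excludes association-list encodings with duplicate EPOC keys, unrepresentable in a real Python dict argument.
-- outside the precondition, e.g. on combile_Pco2({'PCO2 ARTERIAL {NYP}': {'a': [(1, 1)]}}): A raises KeyError, B raises KeyError
import Mathlib
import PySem

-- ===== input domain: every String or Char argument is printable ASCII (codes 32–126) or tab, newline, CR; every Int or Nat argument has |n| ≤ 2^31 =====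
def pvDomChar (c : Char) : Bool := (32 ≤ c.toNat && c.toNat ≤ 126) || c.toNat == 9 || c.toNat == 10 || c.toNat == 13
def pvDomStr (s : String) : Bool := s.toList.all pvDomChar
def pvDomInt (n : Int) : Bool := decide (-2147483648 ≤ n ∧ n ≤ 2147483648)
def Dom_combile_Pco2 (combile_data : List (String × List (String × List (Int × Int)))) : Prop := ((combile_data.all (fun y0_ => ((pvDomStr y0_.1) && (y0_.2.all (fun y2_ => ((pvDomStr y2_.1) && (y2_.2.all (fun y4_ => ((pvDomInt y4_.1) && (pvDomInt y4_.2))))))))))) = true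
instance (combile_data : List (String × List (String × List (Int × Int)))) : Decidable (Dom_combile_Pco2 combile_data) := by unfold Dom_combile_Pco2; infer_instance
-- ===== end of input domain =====

-- B rebuilds the merged dict functionally (comprehension + dict-splat) instead of
-- mutating in place, and merges by consuming queue copies instead of index pointers;
-- equivalence is about the returned value (A mutates the inner dict in place).

-- ===== PORT A =====
-- the two-pointer while loop: i, j indices, result accumulator, then the tails A[i:], B[j:]
def pvMergeIdx (A B : List (Int × Int)) (i j : Nat) (result : List (Int × Int)) : List (Int × Int) :=
  if hi : i < A.length then
    if hj : j < B.length then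
      if A[i].2 < B[j].2 then pvMergeIdx A B (i + 1) j (result ++ [A[i]])
      else pvMergeIdx A B i (j + 1) (result ++ [B[j]])
    else result ++ A.drop i ++ B.drop j
  else result ++ A.drop i ++ B.drop j
termination_by (A.length - i) + (B.length - j)
decreasing_by all_goals omega

def combile_Pco2 (combile_data : List (String × List (String × List (Int × Int)))) : List (String × List (String × List (Int × Int))) :=
  match (PySem.Dict.mk combile_data).get? "PCO2 ARTERIAL {NYP}", (PySem.Dict.mk combile_data).get? "PCO2 (ARTERIAL) - EPOC {NYP}" with
  | some artL, some epocL =>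
      let epoc := PySem.Dict.mk epocL
      -- for k in Pao2_Epoc.keys(): mutate Pao2_art
      let art := epoc.keys.foldl (fun a k =>
          if a.contains k then
            a.insert k (pvMergeIdx (a.getD k []) (epoc.getD k []) 0 0 [])
          else
            a.insert k (epoc.getD k [])) (PySem.Dict.mk artL)
      ((PySem.Dict.mk combile_data).insert "PCO2 ARTERIAL {NYP}" art.items).items
  | _, _ => combile_data  -- KeyError in Python: excluded by Pre_

-- ===== PORT B =====
-- while sa and sb: out.append(sa.pop(0) if sa[0][1] < sb[0][1] else sb.pop(0)); return out + sa + sb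
def pvMergeQ (sa sb out : List (Int × Int)) : List (Int × Int) :=
  match sa, sb with
  | x :: sa', y :: sb' =>
      if x.2 < y.2 then pvMergeQ sa' (y :: sb') (out ++ [x])
      else pvMergeQ (x :: sa') sb' (out ++ [y])
  | _, _ => out ++ sa ++ sb

def combile_Pco2_alt (combile_data : List (String × List (String × List (Int × Int)))) : List (String × List (String × List (Int × Int))) :=
  match (PySem.Dict.mk combile_data).get? "PCO2 ARTERIAL {NYP}" with
  | none => combile_data  -- KeyError in Python: excluded by Pre_
  | some artL =>
    match (PySem.Dict.mk combile_data).get? "PCO2 (ARTERIAL) - EPOC {NYP}" with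
    | none => combile_data  -- KeyError in Python: excluded by Pre_
    | some epocL =>
      let art := PySem.Dict.mk artL
      let epoc := PySem.Dict.mk epocL
      -- merged = {k: _merge(art[k], epoc[k]) if k in art else epoc[k] for k in epoc}
      let merged := epoc.keys.foldl (fun m k =>
          m.insert k (if art.contains k then pvMergeQ (art.getD k []) (epoc.getD k []) [] else epoc.getD k [])) PySem.Dict.empty
      -- {**art, **merged}
      let newArt := merged.items.foldl (fun a kv => a.insert kv.1 kv.2) art
      ((PySem.Dict.mk combile_data).insert "PCO2 ARTERIAL {NYP}" newArt.items).items

-- ===== PRECONDITION & SPEC =====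
-- Pre_ excludes inputs missing either of the two fixed keys, on which A raises KeyError,
-- and association lists whose EPOC entry carries duplicate keys — unreachable for a real
-- Python dict argument, an artefact of the association-list encoding.
def Pre_combile_Pco2 (combile_data : List (String × List (String × List (Int × Int)))) : Prop :=
  "PCO2 ARTERIAL {NYP}" ∈ combile_data.map Prod.fst ∧
  "PCO2 (ARTERIAL) - EPOC {NYP}" ∈ combile_data.map Prod.fst ∧
  (((PySem.Dict.mk combile_data).getD "PCO2 (ARTERIAL) - EPOC {NYP}" []).map Prod.fst).Nodup
instance (combile_data : List (String × List (String × List (Int × Int)))) : Decidable (Pre_combile_Pco2 combile_data) := by unfold Pre_combile_Pco2; infer_instance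

def pvWitness_combile_Pco2 : (List (String × List (String × List (Int × Int)))) :=
  [("PCO2 ARTERIAL {NYP}", [("a", [(1, 2)])]),
   ("PCO2 (ARTERIAL) - EPOC {NYP}", [("a", [(3, 1)]), ("b", [(4, 5)])])]

def Spec_combile_Pco2 (combile_data : List (String × List (String × List (Int × Int)))) (out : List (String × List (String × List (Int × Int)))) : Prop := out = combile_Pco2_alt combile_data
instance (combile_data : List (String × List (String × List (Int × Int)))) (out : List (String × List (String × List (Int × Int)))) : Decidable (Spec_combile_Pco2 combile_data out) := by unfold Spec_combile_Pco2; infer_instance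

-- ===== CLAIM (what is proved, stated in full; the proofs are below) =====
def Claim_equal_combile_Pco2 : Prop := ∀ (combile_data : List (String × List (String × List (Int × Int)))), Dom_combile_Pco2 combile_data → Pre_combile_Pco2 combile_data → Spec_combile_Pco2 combile_data (combile_Pco2 combile_data)

-- ===== LEMMAS AND PROOFS =====

-- the index two-pointer loop equals the queue-consuming loop on the remaining suffixes
lemma mergeIdx_eq_mergeQ (A B : List (Int × Int)) (i j : Nat) (out : List (Int × Int)) :
    pvMergeIdx A B i j out = pvMergeQ (A.drop i) (B.drop j) out := by
  fun_induction pvMergeIdx A B i j out with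
  | case1 i j out hi hj hlt ih =>
      rw [List.drop_eq_getElem_cons hi, List.drop_eq_getElem_cons hj, pvMergeQ, if_pos hlt, ih,
        ← List.drop_eq_getElem_cons hj]
  | case2 i j out hi hj hlt ih =>
      rw [List.drop_eq_getElem_cons hi, List.drop_eq_getElem_cons hj, pvMergeQ, if_neg hlt, ih,
        ← List.drop_eq_getElem_cons hi]
  | case3 i j out hi hj =>
      have : B.drop j = [] := List.drop_eq_nil_of_le (by omega)
      simp [pvMergeQ, this]
  | case4 i j out hi =>
      have : A.drop i = [] := List.drop_eq_nil_of_le (by omega)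
      simp [pvMergeQ, this]

-- the in-place update loop of A equals B's fresh merged dict splatted onto the original art
lemma loop_eq (epoc : PySem.Dict String (List (Int × Int)))
    (art0 : PySem.Dict String (List (Int × Int))) (ks : List String)
    (aAcc mAcc : PySem.Dict String (List (Int × Int)))
    (hnd : ks.Nodup)
    (hfold : aAcc = mAcc.items.foldl (fun a kv => a.insert kv.1 kv.2) art0)
    (hfresh : ∀ k ∈ ks, mAcc.contains k = false)
    (hpres : ∀ k ∈ ks, aAcc.getD k [] = art0.getD k [] ∧ aAcc.contains k = art0.contains k) :
    ks.foldl (fun a k =>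
        if a.contains k then a.insert k (pvMergeIdx (a.getD k []) (epoc.getD k []) 0 0 [])
        else a.insert k (epoc.getD k [])) aAcc
      = (ks.foldl (fun m k =>
          m.insert k (if art0.contains k then pvMergeQ (art0.getD k []) (epoc.getD k []) []
                      else epoc.getD k [])) mAcc).items.foldl (fun a kv => a.insert kv.1 kv.2) art0 := by
  induction ks generalizing aAcc mAcc with
  | nil => simpa using hfold
  | cons k ks ih =>
      have hk := hpres k (by simp)
      have hfr := hfresh k (by simp)
      have hndk : k ∉ ks := (List.nodup_cons.mp hnd).1
      set v : List (Int × Int) :=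
        if art0.contains k then pvMergeQ (art0.getD k []) (epoc.getD k []) [] else epoc.getD k [] with hv
      have hstepA :
          (if aAcc.contains k then aAcc.insert k (pvMergeIdx (aAcc.getD k []) (epoc.getD k []) 0 0 [])
           else aAcc.insert k (epoc.getD k [])) = aAcc.insert k v := by
        rw [hk.1, hk.2, hv, mergeIdx_eq_mergeQ]
        by_cases h : art0.contains k = true <;> simp [h]
      simp only [List.foldl_cons, hstepA]
      refine ih _ _ (List.nodup_cons.mp hnd).2 ?_ ?_ ?_
      · -- aAcc.insert k v = (mAcc.insert k v).items.foldl insert art0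
        rw [PySem.Dict.items_insert_of_not_contains _ _ hfr, List.foldl_append, ← hfold]
        simp
        rw [hv]
      · intro k' hk'
        have hne : k' ≠ k := fun h => hndk (h ▸ hk')
        rw [PySem.Dict.contains_insert]
        simp [hne, hfresh k' (by simp [hk'])]
      · intro k' hk'
        have hne : k' ≠ k := fun h => hndk (h ▸ hk')
        have h1 := (hpres k' (by simp [hk'])).1
        have h2 := (hpres k' (by simp [hk'])).2
        constructor
        · rw [PySem.Dict.getD_insert_of_ne _ _ _ hne, h1]
        · rw [PySem.Dict.contains_insert]
          simp [hne, h2]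

-- ===== VERDICT (by name: the statement is the Claim_ definition above) =====
theorem combile_Pco2_spec : Claim_equal_combile_Pco2 := by
  intro cd _ hpre
  obtain ⟨h1, h2, hnd⟩ := hpre
  unfold Spec_combile_Pco2 combile_Pco2 combile_Pco2_alt
  have hk1 : (PySem.Dict.mk cd).get? "PCO2 ARTERIAL {NYP}" ≠ none := by
    intro h
    rw [PySem.Dict.get?_eq_none_iff_not_mem_keys] at h
    exact h (by simpa [PySem.Dict.keys] using h1)
  have hk2 : (PySem.Dict.mk cd).get? "PCO2 (ARTERIAL) - EPOC {NYP}" ≠ none := by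
    intro h
    rw [PySem.Dict.get?_eq_none_iff_not_mem_keys] at h
    exact h (by simpa [PySem.Dict.keys] using h2)
  obtain ⟨artL, hart⟩ := Option.ne_none_iff_exists'.mp hk1
  obtain ⟨epocL, hepoc⟩ := Option.ne_none_iff_exists'.mp hk2
  rw [hart, hepoc]
  dsimp only
  have hndk : (PySem.Dict.mk epocL).keys.Nodup := by
    have : (PySem.Dict.mk cd).getD "PCO2 (ARTERIAL) - EPOC {NYP}" [] = epocL :=
      PySem.Dict.getD_of_get?_eq_some _ _ hepoc
    rw [this] at hnd
    simpa [PySem.Dict.keys] using hnd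
  have := loop_eq (PySem.Dict.mk epocL) (PySem.Dict.mk artL)
      (PySem.Dict.mk epocL).keys (PySem.Dict.mk artL) PySem.Dict.empty hndk
      rfl (by intro k _; simp) (by intro k _; exact ⟨rfl, rfl⟩)
  rw [this]
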